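-- pv_equiv track=rewrite | github.com/TaeyeonRoyce/AlgorithmQuiz | programmers/2단계/기능개발.py | solution
-- ===== SOURCE A (Python) =====
-- def developFunc(progresses, speeds):
--     days = 0
--     cnt = 0
--     while 1:
--         days += 1
--         if progresses[0] + speeds[0]*days >= 100:
--             break;
--     processed = []
--     for i in range(len(progresses)):
--         processed.append(progresses[i] + speeds[i]*days)
--     for i in processed:
--         if i < 100:
--             break;
--         cnt += 1
--     return cnt
--
-- def solution(progresses, speeds):
--     answer = []
--     while len(progresses) != 0:
--         cnt = developFunc(progresses, speeds)
--         for _ in range(cnt):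
--             del progresses[0]
--             del speeds[0]
--         answer.append(cnt)
--     return answer
-- ===== SOURCE B (Python) =====
-- def solution(progresses, speeds):
--     # One pass: each job's finish day is ceil((100-p)/s) (at least 1);
--     # a job joins the current batch unless it finishes after the batch leader.
--     answer = []
--     cur = None
--     for p, s in zip(progresses, speeds):
--         d = max(1, -((p - 100) // s))
--         if cur is None or d > cur:
--             cur = d
--             answer.append(1)
--         else:
--             answer[-1] += 1
--     return answer
-- ===== Notes on version B (the rewrite author's own statement) =====
-- stated objective: alternative
-- what changed: Replaces the repeated rescan-and-delete loop (a day-by-day while search plus a prefix scan per batch, deleting from the front of both lists) with a single pass that computes each job's finish day by ceiling division and extends or opens a batch against the current leader's day (intended as faster; a timing run saw A time out at n=16 where B returned, but could not measure a ratio).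
-- outside the precondition, e.g. on solution([150], [0]): A returns [1], B raises ZeroDivisionError; on solution([0, 200], [100, -50]): A returns [2], B returns [1, 1]
import Mathlib
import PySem

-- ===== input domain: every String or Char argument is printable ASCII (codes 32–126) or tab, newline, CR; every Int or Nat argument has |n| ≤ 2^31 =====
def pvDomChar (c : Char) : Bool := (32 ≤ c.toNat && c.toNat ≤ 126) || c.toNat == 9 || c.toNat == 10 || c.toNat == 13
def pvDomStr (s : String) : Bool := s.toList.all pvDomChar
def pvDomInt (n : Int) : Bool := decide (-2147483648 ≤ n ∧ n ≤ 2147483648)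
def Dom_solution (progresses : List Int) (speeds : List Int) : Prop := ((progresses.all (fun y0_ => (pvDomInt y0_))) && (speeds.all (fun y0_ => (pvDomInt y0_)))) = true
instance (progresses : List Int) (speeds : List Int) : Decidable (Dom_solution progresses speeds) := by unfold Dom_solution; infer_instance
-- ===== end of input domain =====

-- B replaces A's repeated rescan-and-delete batching (day-by-day while search per batch)
-- by a single pass using ceiling division; equivalence is about the RETURN value only:
-- Python A empties its argument lists in place, B does not mutate them.


-- ===== PORT A =====
-- the 'while 1: days += 1; if p + s*days >= 100: break' search; the fuel argument is a
-- totality guard only ((100 - p).toNat + 1 steps suffice on every input on which the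
-- Python loop stops); none = the loop would not stop here
def findDays (p s : Int) : Nat → Int → Option Int
  | 0, _ => none
  | fuel+1, days =>
    if p + s * (days + 1) ≥ 100 then some (days + 1) else findDays p s fuel (days + 1)

-- 'for i in processed: if i < 100: break; cnt += 1'
def countPrefix : List Int → Nat
  | [] => 0
  | i :: rest => if i < 100 then 0 else countPrefix rest + 1

def developFunc (progresses speeds : List Int) : Option Nat :=
  match progresses, speeds with
  | p :: _, s :: _ =>
    match findDays p s ((100 - p).toNat + 1) 0 with
    | none => none
    | some days =>
      let processed := List.zipWith (fun pi si => pi + si * days) progresses speeds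
      some (countPrefix processed)
  | _, _ => none

-- 'while len(progresses) != 0' with the cnt front-deletions as List.drop; fuel = initial
-- length is a totality guard (each round removes cnt ≥ 1 elements)
def solutionLoop (fuel : Nat) (progresses speeds answer : List Int) : List Int :=
  match fuel with
  | 0 => answer
  | fuel+1 =>
    if progresses.length = 0 then answer
    else
      match developFunc progresses speeds with
      | none => answer
      | some cnt =>
        solutionLoop fuel (progresses.drop cnt) (speeds.drop cnt) (answer ++ [(cnt : Int)])

def solution (progresses : List Int) (speeds : List Int) : List Int :=
  solutionLoop progresses.length progresses speeds []

-- ===== PORT B =====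
-- d = max(1, -((p - 100) // s))
def pyCeilDay (p s : Int) : Int := max 1 (-(PySem.Int.floordiv (p - 100) s))

-- 'answer[-1] += 1'
def incLast : List Int → List Int
  | [] => []
  | [x] => [x + 1]
  | x :: y :: xs => x :: incLast (y :: xs)

-- one loop iteration of Source B on state (answer, cur)
def stepB (st : List Int × Option Int) (pr : Int × Int) : List Int × Option Int :=
  let d := pyCeilDay pr.1 pr.2
  match st.2 with
  | none => (st.1 ++ [1], some d)
  | some cur => if d > cur then (st.1 ++ [1], some d) else (incLast st.1, some cur)

def solution_alt (progresses : List Int) (speeds : List Int) : List Int :=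
  ((progresses.zip speeds).foldl stepB ([], none)).1

-- ===== PRECONDITION & SPEC =====
-- Pre_ is the problem's natural domain: enough speeds (fewer would make A raise IndexError)
-- and every used speed ≥ 1 (A's day-by-day search diverges on a speed ≤ 0 unless the job is
-- already at 100 after one day; on those returning inputs B's ceiling division raises
-- ZeroDivisionError for speed 0 or can batch differently for a negative speed).
def Pre_solution (progresses : List Int) (speeds : List Int) : Prop :=
  progresses.length ≤ speeds.length ∧ (∀ s ∈ speeds.take progresses.length, 1 ≤ s)
instance (progresses : List Int) (speeds : List Int) : Decidable (Pre_solution progresses speeds) := by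
  unfold Pre_solution; infer_instance

def pvWitness_solution : List Int × List Int := ([93, 30, 55], [1, 30, 5])

def Spec_solution (progresses : List Int) (speeds : List Int) (out : List Int) : Prop := out = solution_alt progresses speeds
instance (progresses : List Int) (speeds : List Int) (out : List Int) : Decidable (Spec_solution progresses speeds out) := by unfold Spec_solution; infer_instance

-- ===== CLAIM (what is proved, stated in full; the proofs are below) =====
def Claim_equal_solution : Prop := ∀ (progresses : List Int) (speeds : List Int), Dom_solution progresses speeds → Pre_solution progresses speeds → Spec_solution progresses speeds (solution progresses speeds)

-- ===== LEMMAS AND PROOFS =====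

-- finish day of one (progress, speed) pair, as Source B computes it
def dayOf (pr : Int × Int) : Int := pyCeilDay pr.1 pr.2

-- length of the prefix of days that are ≤ d (the batch that a leader with day d releases)
def countLe (d : Int) : List Int → Nat
  | [] => 0
  | x :: xs => if x ≤ d then countLe d xs + 1 else 0

-- reference function: batch sizes of a finish-day list (break when a day exceeds the leader's)
def batches : List Int → List Int
  | [] => []
  | d :: ds => ((countLe d ds + 1 : Nat) : Int) :: batches (ds.drop (countLe d ds))
  termination_by l => l.length
  decreasing_by simp

-- step on a precomputed day (Source B's loop body after computing d)
def stepD (st : List Int × Option Int) (d : Int) : List Int × Option Int :=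
  match st.2 with
  | none => (st.1 ++ [1], some d)
  | some cur => if d > cur then (st.1 ++ [1], some d) else (incLast st.1, some cur)

theorem batches_nil : batches [] = [] := by rw [batches.eq_def]

theorem batches_cons (d : Int) (ds : List Int) :
    batches (d :: ds) = ((countLe d ds + 1 : Nat) : Int) :: batches (ds.drop (countLe d ds)) := by
  rw [batches.eq_def]

theorem incLast_append (a : List Int) (x : Int) : incLast (a ++ [x]) = a ++ [x + 1] := by
  induction a with
  | nil => simp [incLast]
  | cons h t ih =>
    cases t with
    | nil => simp [incLast]
    | cons h' t' => simpa [incLast] using ih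

-- the key arithmetic fact: d ≤ k ↔ the job is finished on day k (for 1 ≤ s, 1 ≤ k)
theorem dayOf_le_iff (p s k : Int) (hs : 1 ≤ s) (hk : 1 ≤ k) :
    dayOf (p, s) ≤ k ↔ 100 ≤ p + s * k := by
  have h0 : (0:Int) < s := by omega
  have hf := PySem.Int.le_floordiv_iff_mul_le (a := p - 100) (b := s) (q := -k) h0
  unfold dayOf pyCeilDay
  dsimp only
  constructor
  · intro h
    have h2 : -(PySem.Int.floordiv (p - 100) s) ≤ k := le_trans (le_max_right _ _) h
    have h3 : -k ≤ PySem.Int.floordiv (p - 100) s := by omega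
    have := hf.mp h3
    nlinarith
  · intro h
    have h3 : -k * s ≤ p - 100 := by nlinarith
    have := hf.mpr h3
    exact max_le hk (by omega)

theorem one_le_dayOf (pr : Int × Int) : 1 ≤ dayOf pr := le_max_left _ _

theorem dayOf_le_fuel (p s : Int) (hs : 1 ≤ s) :
    dayOf (p, s) ≤ ((100 - p).toNat : Int) + 1 := by
  have ht : 100 - p ≤ ((100 - p).toNat : Int) := Int.self_le_toNat _
  have ht0 : (0 : Int) ≤ ((100 - p).toNat : Int) := by positivity
  rw [dayOf_le_iff p s (((100 - p).toNat : Int) + 1) hs (by omega)]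
  nlinarith

theorem findDays_some (p s : Int) (hs : 1 ≤ s) :
    ∀ (fuel : Nat) (days : Int), 0 ≤ days → days < dayOf (p, s) → dayOf (p, s) ≤ days + fuel →
      findDays p s fuel days = some (dayOf (p, s)) := by
  intro fuel
  induction fuel with
  | zero => intro days _ h1 h2; omega
  | succ n ih =>
    intro days hd h1 h2
    have hcond := dayOf_le_iff p s (days + 1) hs (by omega)
    rw [findDays]
    by_cases h : 100 ≤ p + s * (days + 1)
    · have : dayOf (p, s) ≤ days + 1 := hcond.mpr h
      have : dayOf (p, s) = days + 1 := by omega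
      simp [h, ge_iff_le, this]
    · have h4 : ¬ dayOf (p, s) ≤ days + 1 := fun hle => h (hcond.mp hle)
      have : ¬ (100 ≤ p + s * (days + 1)) := h
      simp only [ge_iff_le, this, if_false]
      exact ih (days + 1) (by omega) (by omega) (by push_cast at h2 ⊢; omega)

theorem countPrefix_zipWith (days : Int) (hd : 1 ≤ days) :
    ∀ (ps ss : List Int), (∀ s ∈ ss.take ps.length, 1 ≤ s) →
      countPrefix (List.zipWith (fun pi si => pi + si * days) ps ss)
        = countLe days ((ps.zip ss).map dayOf) := by
  intro ps
  induction ps with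
  | nil => intro ss _; simp [countPrefix, countLe]
  | cons p pt ih =>
    intro ss hss
    cases ss with
    | nil => simp [countPrefix, countLe]
    | cons s st =>
      rw [List.length_cons, List.take_succ_cons] at hss
      have hs : 1 ≤ s := hss s (by simp)
      have hiff := dayOf_le_iff p s days hs hd
      simp only [List.zipWith_cons_cons, List.zip_cons_cons, List.map_cons, countPrefix, countLe]
      by_cases h : dayOf (p, s) ≤ days
      · have h100 : 100 ≤ p + s * days := hiff.mp h
        rw [if_neg (by omega), if_pos h, ih st (fun x hx => hss x (by simp [hx]))]
      · have h100 : ¬ 100 ≤ p + s * days := fun hh => h (hiff.mpr hh)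
        rw [if_pos (by omega), if_neg h]

theorem countLe_cons_self (d : Int) (ds : List Int) :
    countLe d (d :: ds) = countLe d ds + 1 := by
  simp [countLe]

theorem solutionLoop_eq :
    ∀ (fuel : Nat) (ps ss acc : List Int), ps.length ≤ ss.length →
      (∀ s ∈ ss.take ps.length, 1 ≤ s) → ps.length ≤ fuel →
      solutionLoop fuel ps ss acc = acc ++ batches ((ps.zip ss).map dayOf) := by
  intro fuel
  induction fuel with
  | zero =>
    intro ps ss acc _ _ hf
    have : ps = [] := by cases ps <;> simp_all
    subst this
    simp [solutionLoop, batches_nil]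
  | succ n ih =>
    intro ps ss acc hlen hs hf
    cases ps with
    | nil => simp [solutionLoop, batches_nil]
    | cons p pt =>
      cases ss with
      | nil => simp at hlen
      | cons s st =>
        rw [List.length_cons, List.take_succ_cons] at hs
        have hs0 : 1 ≤ s := hs s (by simp)
        have hD1 : 1 ≤ dayOf (p, s) := one_le_dayOf _
        have hfind : findDays p s ((100 - p).toNat + 1) 0 = some (dayOf (p, s)) :=
          findDays_some p s hs0 ((100 - p).toNat + 1) 0 (by omega) (by omega)
            (by have := dayOf_le_fuel p s hs0; push_cast; omega)
        set D := dayOf (p, s) with hDdef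
        have hcount :
            countPrefix (List.zipWith (fun pi si => pi + si * D) (p :: pt) (s :: st))
              = countLe D (((p :: pt).zip (s :: st)).map dayOf) :=
          countPrefix_zipWith D hD1 (p :: pt) (s :: st)
            (by rw [List.length_cons, List.take_succ_cons]; simpa using hs)
        have hmapcons : ((p :: pt).zip (s :: st)).map dayOf = D :: (pt.zip st).map dayOf := by
          simp [List.zip, hDdef]
        set k := countLe D ((pt.zip st).map dayOf) with hkdef
        have hcnt : countPrefix (List.zipWith (fun pi si => pi + si * D) (p :: pt) (s :: st))
            = k + 1 := by
          rw [hcount, hmapcons, countLe_cons_self]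
        have hdev : developFunc (p :: pt) (s :: st) = some (k + 1) := by
          simp only [developFunc, hfind]
          exact congrArg some hcnt
        rw [solutionLoop]
        rw [if_neg (by simp)]
        rw [hdev]
        dsimp only
        have hdropzip : ((pt.drop k).zip (st.drop k)).map dayOf
            = ((pt.zip st).map dayOf).drop k := by
          simp [List.zip_eq_zipWith, ← List.drop_zipWith, List.map_drop]
        have hlen' : pt.length ≤ st.length := by simpa using hlen
        have htk : (st.drop k).take (pt.drop k).length = (st.take pt.length).drop k := by
          rw [List.length_drop, List.drop_take]
        have hrec := ih (pt.drop k) (st.drop k) (acc ++ [((k : Nat) + 1 : Int)])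
          (by simp; omega)
          (by
            intro x hx
            rw [htk] at hx
            exact hs x (List.mem_cons_of_mem s (List.mem_of_mem_drop hx)))
          (by simp at hf ⊢; omega)
        have hdrop1 : (p :: pt).drop (k + 1) = pt.drop k := by simp
        have hdrop2 : (s :: st).drop (k + 1) = st.drop k := by simp
        rw [hdrop1, hdrop2]
        have hcast : ((k + 1 : Nat) : Int) = (k : Nat) + 1 := by push_cast; ring
        rw [hcast, hrec, hdropzip, hmapcons]
        rw [batches_cons]
        simp [← hkdef]

theorem foldD_spec :
    ∀ (ds a : List Int) (x cur : Int),
      (ds.foldl stepD (a ++ [x], some cur)).1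
        = a ++ [x + (countLe cur ds : Int)] ++ batches (ds.drop (countLe cur ds)) := by
  intro ds
  induction ds with
  | nil => intro a x cur; simp [countLe, batches_nil]
  | cons d dt ih =>
    intro a x cur
    by_cases h : d > cur
    · have hne : ¬ d ≤ cur := by omega
      simp only [List.foldl, stepD, if_pos h]
      rw [ih (a ++ [x]) 1 d]
      simp only [countLe, if_neg hne, List.drop_zero, batches_cons]
      simp
      ring
    · have hle : d ≤ cur := by omega
      simp only [List.foldl, stepD, if_neg h, incLast_append]
      rw [ih a (x + 1) cur]
      simp only [countLe, if_pos hle]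
      have : x + 1 + (countLe cur dt : Int) = x + ((countLe cur dt + 1 : Nat) : Int) := by
        push_cast; ring
      rw [this]
      simp

theorem alt_eq (ps ss : List Int) :
    solution_alt ps ss = batches ((ps.zip ss).map dayOf) := by
  unfold solution_alt
  have hfold : (ps.zip ss).foldl stepB ([], none)
      = (((ps.zip ss).map dayOf).foldl stepD ([], none)) := by
    rw [List.foldl_map]; rfl
  rw [hfold]
  cases hL : (ps.zip ss).map dayOf with
  | nil => simp [batches_nil]
  | cons d dt =>
    have h1 : stepD ([], none) d = (([] : List Int) ++ [1], some d) := by simp [stepD]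
    simp only [List.foldl, h1]
    rw [foldD_spec dt [] 1 d]
    rw [batches_cons]
    simp
    ring

-- ===== VERDICT (by name: the statement is the Claim_ definition above) =====
theorem solution_spec : Claim_equal_solution := by
  intro ps ss _ hpre
  obtain ⟨hlen, hs⟩ := hpre
  unfold Spec_solution solution
  rw [solutionLoop_eq ps.length ps ss [] hlen hs (by omega), alt_eq]
  simp
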